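-- pv_equiv track=rewrite | github.com/jooshjj/Redflag-website-scanner | main.py | find_subdomains
-- ===== SOURCE A (Python) =====
-- def find_subdomains(domain_name):
--     """
--     Finds all subdomains of a given domain name.
--     """
--     subdomains = set()
--     for i in range(1, 10):  # Search up to 10 levels deep
--         subdomain = f"{'.'.join(domain_name.split('.')[:-i])}"
--         if subdomain != domain_name:
--             subdomains.add(subdomain)
--         else:
--             break
--     return subdomains
-- ===== SOURCE B (Python) =====
-- def find_subdomains(domain_name):
--     """
--     Finds all subdomains of a given domain name.
--
--     Strips the rightmost label incrementally (rpartition) instead of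
--     re-splitting and re-joining the whole domain on every iteration.
--     """
--     subdomains = set()
--     cur = domain_name
--     for _ in range(9):  # Search up to 10 levels deep, as the original
--         cur = cur.rpartition('.')[0]
--         if cur == domain_name:
--             break
--         subdomains.add(cur)
--     return subdomains
-- ===== Notes on version B (the rewrite author's own statement) =====
-- stated objective: simpler
-- what changed: B keeps a running string and strips the rightmost label incrementally with rpartition nine times, instead of re-splitting the whole domain and re-joining a shrinking prefix of the label list on every iteration.
import Mathlib
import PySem

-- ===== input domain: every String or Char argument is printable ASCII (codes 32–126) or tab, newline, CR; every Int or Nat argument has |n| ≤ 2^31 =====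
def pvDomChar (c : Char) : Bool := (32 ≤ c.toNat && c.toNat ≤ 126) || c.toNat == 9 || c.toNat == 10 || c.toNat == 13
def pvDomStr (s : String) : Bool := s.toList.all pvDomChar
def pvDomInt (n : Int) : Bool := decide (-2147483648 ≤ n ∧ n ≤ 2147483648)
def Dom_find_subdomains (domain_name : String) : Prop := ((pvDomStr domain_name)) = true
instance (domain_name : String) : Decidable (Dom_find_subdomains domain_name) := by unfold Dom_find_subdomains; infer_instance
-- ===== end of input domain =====

-- B strips the rightmost label incrementally with rpartition instead of re-splitting
-- and re-joining the whole domain each iteration (objective: simpler, same cost class).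

-- ===== PORT A =====
-- for i in range(1, 10): subdomain = '.'.join(domain_name.split('.')[:-i]); if != domain: add else break
-- sep is the literal ".", so Str.split? is always `some`; `.getD []` only unwraps that.
def find_subdomains_go (domain_name : String) (is : List Int) (subs : PySem.Set String) : PySem.Set String :=
  match is with
  | [] => subs
  | i :: rest =>
    let subdomain := PySem.Str.join "." (PySem.List.slice ((PySem.Str.split? domain_name ".").getD []) none (some (-i)))
    if subdomain ≠ domain_name then find_subdomains_go domain_name rest (PySem.Set.add subs subdomain)
    else subs

def find_subdomains (domain_name : String) : List String :=
  find_subdomains_go domain_name (PySem.List.pyRange 1 10 1) PySem.Set.empty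

-- ===== PORT B =====
-- for _ in range(9): cur = cur.rpartition('.')[0]; if cur == domain: break; add cur
-- rpartition('.')[0] has no PySem primitive; ported by hand via Str.rfind (exact: it is
-- everything before the last '.', or "" when there is no '.').
def find_subdomains_alt_go (domain_name : String) (n : Nat) (cur : String) (subs : PySem.Set String) : PySem.Set String :=
  match n with
  | 0 => subs
  | Nat.succ m =>
    let i := PySem.Str.rfind cur "."
    let cur' := if i < 0 then "" else PySem.Str.slice cur none (some i)
    if cur' = domain_name then subs
    else find_subdomains_alt_go domain_name m cur' (PySem.Set.add subs cur')

def find_subdomains_alt (domain_name : String) : List String :=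
  find_subdomains_alt_go domain_name 9 domain_name PySem.Set.empty

-- ===== PRECONDITION & SPEC =====
def Spec_find_subdomains (domain_name : String) (out : List String) : Prop := out = find_subdomains_alt domain_name
instance (domain_name : String) (out : List String) : Decidable (Spec_find_subdomains domain_name out) := by unfold Spec_find_subdomains; infer_instance

-- ===== CLAIM (what is proved, stated in full; the proofs are below) =====
def Claim_equal_find_subdomains : Prop := ∀ (domain_name : String), Dom_find_subdomains domain_name → Spec_find_subdomains domain_name (find_subdomains domain_name)

-- ===== LEMMAS AND PROOFS =====

-- Reference form of str.split('.') on the character list.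
def splitDotCons (x : List Char) : List (List Char) → List (List Char)
  | [] => [x]
  | p :: ps => (x ++ p) :: ps

def splitDot : List Char → List (List Char)
  | [] => [[]]
  | c :: rest => if c = '.' then [] :: splitDot rest else splitDotCons [c] (splitDot rest)

theorem splitDot_ne_nil (cs : List Char) : splitDot cs ≠ [] := by
  induction cs with
  | nil => simp [splitDot]
  | cons c rest ih =>
    simp only [splitDot]
    split
    · simp
    · cases h : splitDot rest <;> simp [splitDotCons]

theorem splitDotCons_append (x y : List Char) (M : List (List Char)) :
    splitDotCons (x ++ y) M = splitDotCons x (splitDotCons y M) := by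
  cases M <;> simp [splitDotCons]

theorem splitOn_go_spec (l : List Char) : ∀ (fuel : Nat), l.length ≤ fuel →
    ∀ (cur : List Char) (acc : List (List Char)),
    PySem.Chars.splitOn.go ['.'] fuel l cur acc
      = acc.reverse ++ splitDotCons cur.reverse (splitDot l) := by
  induction l with
  | nil =>
    intro fuel _ cur acc
    cases fuel <;> simp [PySem.Chars.splitOn.go, splitDot, splitDotCons]
  | cons c rest ih =>
    intro fuel hf cur acc
    cases fuel with
    | zero => simp at hf
    | succ f =>
      have hf' : rest.length ≤ f := by simpa using hf
      by_cases hc : c = '.'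
      · subst hc
        have hpre : List.isPrefixOf ['.'] ('.' :: rest) = true := by
          simp [List.isPrefixOf]
        have hdrop : List.drop ['.'].length ('.' :: rest) = rest := by simp
        simp only [PySem.Chars.splitOn.go, hpre, if_true, hdrop]
        rw [ih f hf' [] (cur.reverse :: acc)]
        cases h : splitDot rest with
        | nil => exact absurd h (splitDot_ne_nil rest)
        | cons p ps =>
          simp [splitDot, splitDotCons, h]
      · have hpre : List.isPrefixOf ['.'] (c :: rest) = false := by
          simp [List.isPrefixOf]
          exact fun h => absurd h.symm hc
        simp only [PySem.Chars.splitOn.go, hpre]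
        rw [ih f hf' (c :: cur) acc]
        simp only [List.reverse_cons]
        rw [splitDotCons_append, splitDot]
        simp [hc, splitDotCons]

theorem splitDotCons_nil (M : List (List Char)) (h : M ≠ []) : splitDotCons [] M = M := by
  cases M with
  | nil => exact absurd rfl h
  | cons p ps => simp [splitDotCons]

theorem splitOn_eq_splitDot (cs : List Char) :
    PySem.Chars.splitOn cs ['.'] = splitDot cs := by
  have h := splitOn_go_spec cs (cs.length + 1) (by omega) [] []
  rw [PySem.Chars.splitOn, h]
  simp [splitDotCons_nil _ (splitDot_ne_nil cs)]

theorem join_cons (sep : List Char) (c : Char) (p : List Char) (ps : List (List Char)) :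
    PySem.Chars.join sep ((c :: p) :: ps) = c :: PySem.Chars.join sep (p :: ps) := by
  cases ps with
  | nil => simp [PySem.Chars.join_singleton]
  | cons q qs => simp [PySem.Chars.join_cons_cons]

theorem join_splitDot (cs : List Char) :
    PySem.Chars.join ['.'] (splitDot cs) = cs := by
  induction cs with
  | nil => simp [splitDot, PySem.Chars.join_singleton]
  | cons c rest ih =>
    simp only [splitDot]
    by_cases hc : c = '.'
    · subst hc
      simp only [if_true]
      cases h : splitDot rest with
      | nil => exact absurd h (splitDot_ne_nil rest)
      | cons p ps =>
        rw [h] at ih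
        simp [PySem.Chars.join_cons_cons, ih]
    · simp only [hc, if_false]
      cases h : splitDot rest with
      | nil => exact absurd h (splitDot_ne_nil rest)
      | cons p ps =>
        rw [h] at ih
        simp [splitDotCons, join_cons, ih]

theorem splitDot_dotFree (cs : List Char) : ∀ p ∈ splitDot cs, '.' ∉ p := by
  induction cs with
  | nil => simp [splitDot]
  | cons c rest ih =>
    obtain ⟨q, qs, h⟩ := List.exists_cons_of_ne_nil (splitDot_ne_nil rest)
    by_cases hc : c = '.'
    · subst hc
      simp only [splitDot, if_true]
      intro p hp
      rcases List.mem_cons.mp hp with rfl | hp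
      · simp
      · exact ih p hp
    · simp only [splitDot, hc, if_false, h, splitDotCons]
      intro p hp
      rcases List.mem_cons.mp hp with rfl | hp
      · intro hmem
        rcases List.mem_cons.mp hmem with h1 | h1
        · exact hc h1.symm
        · exact ih q (by simp [h]) h1
      · exact ih p (by simp [h, hp])

-- rfind with a single-character needle
theorem rfind_go_no_dot (s : List Char) (h : '.' ∉ s) :
    ∀ j, PySem.Chars.rfind.go s ['.'] j = -1 := by
  intro j
  induction j with
  | zero =>
    simp only [PySem.Chars.rfind.go]
    have : List.isPrefixOf ['.'] s = false := by
      cases s with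
      | nil => simp [List.isPrefixOf]
      | cons a as =>
        simp [List.isPrefixOf]
        intro ha; exact absurd (ha ▸ List.mem_cons_self) h
    simp [this]
  | succ j ih =>
    simp only [PySem.Chars.rfind.go]
    have : List.isPrefixOf ['.'] (List.drop (j + 1) s) = false := by
      by_contra hb
      have : List.isPrefixOf ['.'] (List.drop (j + 1) s) = true := by
        simpa using hb
      have hpre := List.isPrefixOf_iff_prefix.mp this
      have : '.' ∈ List.drop (j + 1) s := hpre.mem (by simp)
      exact h (List.mem_of_mem_drop this)
    simpa [this] using ih

theorem rfind_no_dot (s : List Char) (h : '.' ∉ s) :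
    PySem.Chars.rfind s ['.'] = -1 := rfind_go_no_dot s h _

theorem rfind_go_last (t u : List Char) (h : '.' ∉ u) :
    ∀ m, PySem.Chars.rfind.go (t ++ '.' :: u) ['.'] (t.length + m) = t.length := by
  intro m
  induction m with
  | zero =>
    cases ht : t.length with
    | zero =>
      have : t = [] := List.eq_nil_of_length_eq_zero ht
      subst this
      simp [PySem.Chars.rfind.go, List.isPrefixOf]
    | succ n =>
      have hdrop : List.drop (n + 1) (t ++ '.' :: u) = '.' :: u := by
        rw [← ht]; exact List.drop_left
      rw [Nat.add_zero]
      simp only [PySem.Chars.rfind.go, hdrop]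
      simp [List.isPrefixOf]
  | succ m ih =>
    have hdrop : List.drop (t.length + m + 1) (t ++ '.' :: u) = List.drop m u := by
      have h1 : List.drop (t.length + m + 1) t = [] := List.drop_eq_nil_of_le (by omega)
      have h2 : t.length + m + 1 - t.length = m + 1 := by omega
      rw [List.drop_append, h1, h2]
      simp
    have hpre : List.isPrefixOf ['.'] (List.drop (t.length + m + 1)  (t ++ '.' :: u)) = false := by
      rw [hdrop]
      by_contra hb
      have hb' : List.isPrefixOf ['.'] (List.drop m u) = true := by simpa using hb
      have : '.' ∈ List.drop m u := (List.isPrefixOf_iff_prefix.mp hb').mem (by simp)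
      exact h (List.mem_of_mem_drop this)
    have hstep : t.length + (m + 1) = (t.length + m) + 1 := by omega
    rw [hstep]
    simp only [PySem.Chars.rfind.go, hpre]
    simpa using ih

theorem rfind_last (t u : List Char) (h : '.' ∉ u) :
    PySem.Chars.rfind (t ++ '.' :: u) ['.'] = t.length := by
  have hlen : (t ++ '.' :: u).length = t.length + (u.length + 1) := by simp
  have := rfind_go_last t u h (u.length + 1)
  rw [PySem.Chars.rfind, hlen]
  exact this

-- the value held by both loops after stripping down to the first k labels
def gj (cs : List Char) (k : Nat) : String :=
  String.ofList (PySem.Chars.join ['.'] ((splitDot cs).take k))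

theorem join_append_singleton (sep : List Char) (M : List (List Char)) (hM : M ≠ []) (x : List Char) :
    PySem.Chars.join sep (M ++ [x]) = PySem.Chars.join sep M ++ sep ++ x := by
  induction M with
  | nil => exact absurd rfl hM
  | cons p ps ih =>
    cases ps with
    | nil => simp [PySem.Chars.join_cons_cons, PySem.Chars.join_singleton]
    | cons q qs =>
      have := ih (by simp)
      simp only [List.cons_append, PySem.Chars.join_cons_cons] at this ⊢
      rw [this]
      simp [List.append_assoc]

theorem gj_zero (cs : List Char) : gj cs 0 = "" := by
  simp [gj, PySem.Chars.join_nil]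

theorem gj_full (d : String) : gj d.toList ((splitDot d.toList).length) = d := by
  simp [gj, List.take_length, join_splitDot, String.ofList_toList]

-- one B-iteration maps gj k to gj (k-1)
theorem step_gj (cs : List Char) (k : Nat) (hk : k ≤ (splitDot cs).length) :
    (if PySem.Str.rfind (gj cs k) "." < 0 then ""
     else PySem.Str.slice (gj cs k) none (some (PySem.Str.rfind (gj cs k) "."))) = gj cs (k - 1) := by
  have hdot : (".").toList = ['.'] := rfl
  have htl : (gj cs k).toList = PySem.Chars.join ['.'] ((splitDot cs).take k) := by
    simp [gj, String.toList_ofList]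
  match k, hk with
  | 0, _ =>
    have : PySem.Str.rfind (gj cs 0) "." = -1 := by
      rw [PySem.Str.rfind_eq, hdot, htl]
      simp [List.take_zero, PySem.Chars.join_nil, PySem.Chars.rfind, PySem.Chars.rfind.go,
        List.isPrefixOf]
    rw [this]
    simp [gj_zero]
  | 1, hk =>
    have hlen : 0 < (splitDot cs).length := by omega
    have htake : (splitDot cs).take 1 = [(splitDot cs)[0]] := by
      rw [List.take_succ]
      simp [List.getElem?_eq_getElem hlen]
    have hfree : '.' ∉ (splitDot cs)[0] := splitDot_dotFree cs _ (List.getElem_mem hlen)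
    have : PySem.Str.rfind (gj cs 1) "." = -1 := by
      rw [PySem.Str.rfind_eq, hdot, htl, htake, PySem.Chars.join_singleton]
      exact rfind_no_dot _ hfree
    rw [this]
    simp [gj_zero]
  | (j+2), hk =>
    have hj : j + 1 < (splitDot cs).length := by omega
    have htake : (splitDot cs).take (j+2) = (splitDot cs).take (j+1) ++ [(splitDot cs)[j+1]] := by
      rw [List.take_succ]
      simp [List.getElem?_eq_getElem hj]
    have hM : (splitDot cs).take (j+1) ≠ [] := by
      have : ((splitDot cs).take (j+1)).length = j + 1 := by
        rw [List.length_take]; omega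
      intro hnil
      rw [hnil] at this
      simp at this
    have hfree : '.' ∉ (splitDot cs)[j+1] := splitDot_dotFree cs _ (List.getElem_mem hj)
    have hjoin : PySem.Chars.join ['.'] ((splitDot cs).take (j+2))
        = PySem.Chars.join ['.'] ((splitDot cs).take (j+1)) ++ '.' :: (splitDot cs)[j+1] := by
      rw [htake, join_append_singleton _ _ hM]
      simp
    have hrf : PySem.Str.rfind (gj cs (j+2)) "."
        = ((PySem.Chars.join ['.'] ((splitDot cs).take (j+1))).length : Int) := by
      rw [PySem.Str.rfind_eq, hdot, htl, hjoin]
      exact rfind_last _ _ hfree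
    rw [hrf]
    rw [if_neg (by omega)]
    have hsl : (PySem.Str.slice (gj cs (j+2)) none
        (some ((PySem.Chars.join ['.'] ((splitDot cs).take (j+1))).length : Int))).toList
        = PySem.Chars.join ['.'] ((splitDot cs).take (j+1)) := by
      rw [PySem.Str.toList_slice, PySem.Chars.slice_eq_listSlice,
        PySem.List.slice_to _ (by positivity), htl, hjoin]
      simp [List.take_left]
    have : PySem.Str.slice (gj cs (j+2)) none
        (some ((PySem.Chars.join ['.'] ((splitDot cs).take (j+1))).length : Int))
        = gj cs (j+1) := by
      rw [← String.ofList_toList (s := PySem.Str.slice _ _ _), hsl]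
      rfl
    rw [this]
    rfl

-- the A-side subdomain expression, in terms of gj
theorem a_sub_eq (d : String) (i : Int) (h1 : 1 ≤ i) :
    PySem.Str.join "." (PySem.List.slice ((PySem.Str.split? d ".").getD []) none (some (-i)))
      = gj d.toList ((splitDot d.toList).length - i.toNat) := by
  have hdot : (".").toList = ['.'] := rfl
  -- identify the split
  have hsplit : PySem.Str.split? d "." = some ((splitDot d.toList).map String.ofList) := by
    have h := PySem.Str.split?_map d "."
    rw [hdot] at h
    have hx : PySem.Chars.split? d.toList ['.'] = some (splitDot d.toList) := by
      simp [PySem.Chars.split?, splitOn_eq_splitDot]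
    rw [hx] at h
    cases hs : PySem.Str.split? d "." with
    | none => rw [hs] at h; simp at h
    | some P =>
      rw [hs] at h
      simp only [Option.map_some, Option.some.injEq] at h
      have : P = (splitDot d.toList).map String.ofList := by
        have := congrArg (List.map String.ofList) h
        simpa [List.map_map, Function.comp_def, String.ofList_toList] using this
      rw [this]
  rw [hsplit]
  simp only [Option.getD_some]
  -- the negative slice
  have hi : -i = -((i.toNat : Nat) : Int) := by omega
  rw [hi, PySem.List.slice_to_neg_natCast _ _ (by omega)]
  rw [← List.map_take, List.length_map]
  -- join of mapped labels
  rw [← String.ofList_toList (s := PySem.Str.join _ _)]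
  rw [PySem.Str.toList_join, hdot]
  simp only [List.map_map, Function.comp_def, String.toList_ofList, List.map_id']
  rfl

-- the two loops, step by step
theorem loop_eq (d : String) : ∀ (n : Nat), n ≤ 9 → ∀ (subs : PySem.Set String),
    find_subdomains_go d (PySem.List.pyRange (10 - (n : Int)) 10 1) subs
      = find_subdomains_alt_go d n (gj d.toList ((splitDot d.toList).length - (9 - n))) subs := by
  intro n
  induction n with
  | zero =>
    intro _ subs
    have : PySem.List.pyRange (10 - ((0 : Nat) : Int)) 10 1 = [] := by decide
    rw [this]
    rfl
  | succ n ih =>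
    intro hn subs
    have hlt : (10 - ((n + 1 : Nat) : Int)) < 10 := by push_cast; omega
    rw [PySem.List.pyRange_one_cons hlt]
    show (let subdomain := PySem.Str.join "." (PySem.List.slice ((PySem.Str.split? d ".").getD [])
            none (some (-(10 - ((n + 1 : Nat) : Int)))));
          if subdomain ≠ d then
            find_subdomains_go d (PySem.List.pyRange (10 - ((n + 1 : Nat) : Int) + 1) 10 1)
              (PySem.Set.add subs subdomain)
          else subs) = _
    have hi1 : (1 : Int) ≤ 10 - ((n + 1 : Nat) : Int) := by push_cast; omega
    have hA := a_sub_eq d (10 - ((n + 1 : Nat) : Int)) hi1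
    have htn : (10 - ((n + 1 : Nat) : Int)).toNat = 9 - n := by push_cast; omega
    rw [htn] at hA
    -- B's step from cur = gj (len - (9 - (n+1)))
    have hB := step_gj d.toList ((splitDot d.toList).length - (9 - (n + 1)))
      (by omega)
    have hk : (splitDot d.toList).length - (9 - (n + 1)) - 1
        = (splitDot d.toList).length - (9 - n) := by omega
    rw [hk] at hB
    simp only [hA]
    show (if gj d.toList ((splitDot d.toList).length - (9 - n)) ≠ d then
            find_subdomains_go d (PySem.List.pyRange (10 - ((n + 1 : Nat) : Int) + 1) 10 1)
              (PySem.Set.add subs (gj d.toList ((splitDot d.toList).length - (9 - n))))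
          else subs) = _
    rw [show (10 - ((n + 1 : Nat) : Int) + 1) = 10 - ((n : Nat) : Int) by push_cast; omega]
    show _ = find_subdomains_alt_go d (n + 1) (gj d.toList ((splitDot d.toList).length - (9 - (n + 1)))) subs
    simp only [find_subdomains_alt_go, hB]
    by_cases hd : gj d.toList ((splitDot d.toList).length - (9 - n)) = d
    · simp [hd]
    · simp only [if_neg hd, ne_eq, not_false_iff, if_pos (by exact hd)]
      exact ih (by omega) _

-- ===== VERDICT (by name: the statement is the Claim_ definition above) =====
theorem find_subdomains_spec : Claim_equal_find_subdomains := by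
  intro d _
  unfold Spec_find_subdomains
  unfold find_subdomains find_subdomains_alt
  have h9 : (10 - ((9 : Nat) : Int)) = 1 := by decide
  have := loop_eq d 9 (by omega) PySem.Set.empty
  rw [h9] at this
  rw [this]
  simp [Nat.sub_zero, gj_full]
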